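-- pv_equiv track=rewrite | github.com/MrBrantCode/unitest_baseline | mut_generate/mist_train_cf/cf_46857/solution.py | replace_characters
-- ===== SOURCE A (Python) =====
-- def replace_characters(string, mapping):
--     default = "&"
--     new_string = ""
--     for char in string:
--         if not char.isalpha():
--             new_string += mapping.get(char, default)
--         else:
--             new_string += char
--     # removing consecutive duplicates
--     i = 0
--     while i < len(new_string) - 1:
--         if new_string[i] == new_string[i+1] and new_string[i] in mapping.values():
--             new_string = new_string[:i] + new_string[i+1:]
--         else:
--             i += 1
--     return new_string
-- ===== SOURCE B (Python) =====
-- def replace_characters(string, mapping):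
--     # one streaming pass: emit replacement chars, skipping a char equal to the
--     # previously emitted one when it is one of the mapping's (1-char) values
--     vals = set(mapping.values())
--     out = []
--     for char in string:
--         r = char if char.isalpha() else mapping.get(char, "&")
--         for ch in r:
--             if out and out[-1] == ch and ch in vals:
--                 continue
--             out.append(ch)
--     return "".join(out)
-- ===== Notes on version B (the rewrite author's own statement) =====
-- stated objective: faster
-- what changed: B replaces A's build-then-rescan (a while loop that repeatedly splices the string, O(n^2) slicing) with a single streaming pass that appends each replacement character unless it duplicates the last emitted character and is a mapping value.
import Mathlib
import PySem

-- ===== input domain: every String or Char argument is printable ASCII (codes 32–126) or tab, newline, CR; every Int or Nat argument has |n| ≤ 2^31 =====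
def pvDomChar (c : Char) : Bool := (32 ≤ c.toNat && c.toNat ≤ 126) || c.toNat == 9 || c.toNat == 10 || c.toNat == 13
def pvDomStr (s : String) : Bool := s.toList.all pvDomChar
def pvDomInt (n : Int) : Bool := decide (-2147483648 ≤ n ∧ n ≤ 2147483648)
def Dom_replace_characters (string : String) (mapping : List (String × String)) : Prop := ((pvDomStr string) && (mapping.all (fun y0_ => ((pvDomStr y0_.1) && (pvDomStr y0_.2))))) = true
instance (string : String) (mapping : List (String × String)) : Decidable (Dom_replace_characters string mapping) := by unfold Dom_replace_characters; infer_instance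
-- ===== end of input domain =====

-- B streams once over the input, skipping a replacement character that duplicates the last
-- emitted one and is a mapping value, instead of A's build-then-quadratic-splice rescan (faster).


-- ===== PORT A =====
-- A's while loop: Python's slice new_string[:i] + new_string[i+1:] with 0 ≤ i, i+1 ≤ len is
-- exactly take i ++ drop (i+1); 'i < len(new_string) - 1' on Nat index i is 'i + 1 < length'
-- (for length 0 Python's len-1 is -1 and that loop does not run either). The loop is run with
-- fuel 2*length (each step deletes a character or advances i, so 2*length - i bounds the
-- remaining steps and the fuel is never exhausted: a totality guard only, not an algorithm change).
def pvLoopA (vals : List String) : Nat → List Char → Nat → List Char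
  | 0, s, _ => s
  | fuel+1, s, i =>
    if i + 1 < s.length then
      if s.getD i ' ' == s.getD (i+1) ' ' && vals.contains (String.ofList [s.getD i ' ']) then
        pvLoopA vals fuel (s.take i ++ s.drop (i+1)) i
      else
        pvLoopA vals fuel s (i+1)
    else s

def replace_characters (string : String) (mapping : List (String × String)) : String :=
  let new_string := string.toList.foldl (fun acc char =>
      if ¬ PySem.Chars.isalpha char then
        acc ++ ((PySem.Dict.ofList mapping).getD (String.ofList [char]) "&").toList
      else acc ++ [char]) []
  String.ofList (pvLoopA (PySem.Dict.ofList mapping).values (2 * new_string.length) new_string 0)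

-- ===== PORT B =====
-- vals = set(mapping.values()), computed once
def pvAltVals (mapping : List (String × String)) : PySem.Set String :=
  PySem.Set.ofList (PySem.Dict.ofList mapping).values

def replace_characters_alt (string : String) (mapping : List (String × String)) : String :=
  String.ofList (string.toList.foldl (fun out char =>
    (if PySem.Chars.isalpha char then String.ofList [char]
     else (PySem.Dict.ofList mapping).getD (String.ofList [char]) "&").toList.foldl
      (fun out ch =>
        if out ≠ [] ∧ out.getLast? = some ch ∧ (pvAltVals mapping).contains (String.ofList [ch]) then out
        else out ++ [ch]) out) [])

-- ===== PRECONDITION & SPEC =====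
def Spec_replace_characters (string : String) (mapping : List (String × String)) (out : String) : Prop := out = replace_characters_alt string mapping
instance (string : String) (mapping : List (String × String)) (out : String) : Decidable (Spec_replace_characters string mapping out) := by unfold Spec_replace_characters; infer_instance

-- ===== CLAIM (what is proved, stated in full; the proofs are below) =====
def Claim_equal_replace_characters : Prop := ∀ (string : String) (mapping : List (String × String)), Dom_replace_characters string mapping → Spec_replace_characters string mapping (replace_characters string mapping)

-- ===== LEMMAS AND PROOFS =====

-- per-character replacement (both programs compute it, in opposite branch order)
def pvRep (d : PySem.Dict String String) (c : Char) : List Char :=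
  if PySem.Chars.isalpha c then [c] else (d.getD (String.ofList [c]) "&").toList

-- "c is a (single-character) mapping value"
def pvVal (vals : List String) (c : Char) : Bool := vals.contains (String.ofList [c])

-- B's streaming dedupe, as a function of the last emitted character
def pvDed (vals : List String) : Option Char → List Char → List Char
  | _, [] => []
  | last, c :: t =>
      if last = some c ∧ pvVal vals c then pvDed vals last t
      else c :: pvDed vals (some c) t

theorem pvFoldl_flatMap {α β σ : Type} (g : α → List β) (f : σ → β → σ) :
    ∀ (l : List α) (init : σ),
      (l.flatMap g).foldl f init = l.foldl (fun a x => (g x).foldl f a) init := by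
  intro l
  induction l with
  | nil => intro init; rfl
  | cons x t ih => intro init; simp [List.flatMap_cons, List.foldl_append, ih]

-- B's inner fold is pvDed driven by the accumulator's last element
theorem pvFoldl_step_eq_ded (vals : List String) :
    ∀ (rest out : List Char),
      rest.foldl (fun out ch =>
        if out ≠ [] ∧ out.getLast? = some ch ∧ pvVal vals ch then out
        else out ++ [ch]) out = out ++ pvDed vals out.getLast? rest := by
  intro rest
  induction rest with
  | nil => intro out; simp [pvDed]
  | cons c t ih =>
    intro out
    by_cases h : out.getLast? = some c ∧ pvVal vals c
    · have hne : out ≠ [] := by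
        intro he; rw [he] at h; simp at h
      have hcond : out ≠ [] ∧ out.getLast? = some c ∧ pvVal vals c = true := ⟨hne, h.1, h.2⟩
      rw [List.foldl_cons, if_pos hcond, ih]
      simp only [pvDed, if_pos h]
    · have hcond : ¬ (out ≠ [] ∧ out.getLast? = some c ∧ pvVal vals c = true) := by
        intro hc; exact h ⟨hc.2.1, hc.2.2⟩
      rw [List.foldl_cons, if_neg hcond, ih]
      simp only [pvDed, if_neg h]
      simp

-- removing one member of a collapsible duplicate pair does not change pvDed
theorem pvDed_dedup (vals : List String) (c : Char) (hval : pvVal vals c = true) :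
    ∀ (p : List Char) (last : Option Char) (t : List Char),
      pvDed vals last (p ++ c :: c :: t) = pvDed vals last (p ++ c :: t) := by
  intro p
  induction p with
  | nil =>
    intro last t
    simp only [List.nil_append, pvDed]
    by_cases h : last = some c ∧ pvVal vals c
    · simp [h]
    · have hne : ¬ last = some c := fun he => h ⟨he, hval⟩
      simp [hne, hval]
  | cons a p' ih =>
    intro last t
    by_cases h : last = some a ∧ pvVal vals a
    · simp only [List.cons_append, pvDed, if_pos h, ih]
    · simp only [List.cons_append, pvDed, if_neg h, ih]

-- on a list with no collapsible adjacent pair (and a compatible boundary) pvDed is the identity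
theorem pvDed_clean (vals : List String) :
    ∀ (s : List Char) (last : Option Char),
      (∀ j, j + 1 < s.length → ¬ (s.getD j ' ' = s.getD (j+1) ' ' ∧ pvVal vals (s.getD j ' ') = true)) →
      (∀ c, s.head? = some c → ¬ (last = some c ∧ pvVal vals c = true)) →
      pvDed vals last s = s := by
  intro s
  induction s with
  | nil => intro last _ _; rfl
  | cons c t ih =>
    intro last hpairs hhead
    have hnc : ¬ (last = some c ∧ pvVal vals c) := hhead c rfl
    simp only [pvDed, if_neg hnc]
    congr 1
    apply ih
    · intro j hj
      have := hpairs (j+1) (by simpa using Nat.succ_lt_succ hj)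
      simpa using this
    · intro c' hc' hcontr
      rcases hcontr with ⟨hc'', hv⟩
      have hc3 : c = c' := by injection hc''
      subst hc3
      cases t with
      | nil => simp at hc'
      | cons b t' =>
        have hb : b = c := by injection hc'
        subst hb
        exact hpairs 0 (by simp) ⟨rfl, hv⟩

-- A's splice loop computes pvDed from scratch whenever the prefix before i is already clean
theorem pvLoopA_eq_ded (vals : List String) :
    ∀ (fuel : Nat) (s : List Char) (i : Nat), 2 * s.length - i ≤ fuel →
      (∀ j, j < i → j + 1 < s.length →
        ¬ (s.getD j ' ' = s.getD (j+1) ' ' ∧ pvVal vals (s.getD j ' ') = true)) →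
      pvLoopA vals fuel s i = pvDed vals none s := by
  intro fuel
  induction fuel with
  | zero =>
    intro s i hle hclean
    show s = pvDed vals none s
    symm
    apply pvDed_clean
    · intro j hjlen
      exact hclean j (by omega) hjlen
    · intro c _ hcontr
      exact Option.some_ne_none c hcontr.1.symm
  | succ n ih =>
    intro s i hle hclean
    show (if i + 1 < s.length then _ else s) = pvDed vals none s
    by_cases hlt : i + 1 < s.length
    · rw [if_pos hlt]
      by_cases hcoll : (s.getD i ' ' == s.getD (i+1) ' ' && vals.contains (String.ofList [s.getD i ' '])) = true
      · -- collapsible pair at i: splice the string and stay at i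
        rw [if_pos hcoll]
        set c := s.getD i ' ' with hc
        have hib : (c == s.getD (i+1) ' ') = true ∧ vals.contains (String.ofList [c]) = true :=
          (Bool.and_eq_true _ _).mp hcoll
        have heq : c = s.getD (i+1) ' ' := eq_of_beq hib.1
        have hval : pvVal vals c = true := hib.2
        have hi : i < s.length := by omega
        have hgi : s[i] = c := (List.getD_eq_getElem s ' ' hi).symm
        have hgi1 : s[i+1] = c := by
          rw [← List.getD_eq_getElem s ' ' hlt]; exact heq.symm
        have hdrop : s.drop i = c :: c :: s.drop (i+2) := by
          rw [List.drop_eq_getElem_cons hi, List.drop_eq_getElem_cons hlt, hgi, hgi1]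
        have hdrop1 : s.drop (i+1) = c :: s.drop (i+2) := by
          rw [← List.tail_drop, hdrop]; rfl
        have hsplit : s = s.take i ++ c :: c :: s.drop (i+2) := by
          rw [← hdrop, List.take_append_drop]
        have hs' : s.take i ++ s.drop (i+1) = s.take i ++ c :: s.drop (i+2) := by rw [hdrop1]
        have htakelen : (s.take i).length = i := by simp [List.length_take]; omega
        have hlen' : (s.take i ++ s.drop (i+1)).length = s.length - 1 := by
          simp [List.length_take, List.length_drop]; omega
        have hih := ih (s.take i ++ s.drop (i+1)) i (by omega) ?_
        · rw [hih, hs']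
          conv_rhs => rw [hsplit]
          rw [pvDed_dedup vals c hval]
        · -- the spliced list is still clean before i
          intro j hj hjlen
          rw [hs'] at hjlen ⊢
          have htake : ∀ k, k < i →
              (s.take i ++ c :: s.drop (i+2)).getD k ' ' = s.getD k ' ' := by
            intro k hk
            have hki : k < (s.take i).length := by omega
            simp only [List.getD_eq_getElem?_getD, List.getElem?_append_left hki,
              List.getElem?_take]
            simp [hk]
          by_cases hj1 : j + 1 < i
          · rw [htake j (by omega), htake (j+1) hj1]
            exact hclean j hj (by omega)
          · -- j + 1 = i : the new pair is (s[i-1], c) and c = s[i]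
            have hji : j + 1 = i := by omega
            have hgII : (s.take i ++ c :: s.drop (i+2)).getD i ' ' = c := by
              have hle2 : (s.take i).length ≤ i := le_of_eq htakelen
              simp only [List.getD_eq_getElem?_getD, List.getElem?_append_right hle2, htakelen]
              simp
            rw [hji, hgII, htake j (by omega)]
            intro hcontr
            apply hclean j hj (by omega)
            refine ⟨?_, hcontr.2⟩
            have hgj1 : s.getD (j+1) ' ' = c := by rw [hji, ← hc]
            rw [hgj1]; exact hcontr.1
      · rw [if_neg hcoll]
        apply ih s (i+1) (by omega)
        intro j hj hjlen
        by_cases hji : j < i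
        · exact hclean j hji hjlen
        · have hje : j = i := by omega
          subst hje
          intro hcontr
          apply hcoll
          rw [Bool.and_eq_true]
          exact ⟨beq_iff_eq.mpr hcontr.1, by simpa [pvVal] using hcontr.2⟩
    · rw [if_neg hlt]
      symm
      apply pvDed_clean
      · intro j hjlen
        exact hclean j (by omega) hjlen
      · intro c _ hcontr
        exact Option.some_ne_none c hcontr.1.symm

-- the set-membership test B uses equals the list-membership test A uses
theorem pvVal_set (mapping : List (String × String)) (c : Char) :
    (pvAltVals mapping).contains (String.ofList [c]) =
      pvVal (PySem.Dict.ofList mapping).values c := by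
  simp [pvAltVals, PySem.Set.contains, pvVal]

-- ===== VERDICT (by name: the statement is the Claim_ definition above) =====
theorem replace_characters_spec : Claim_equal_replace_characters := by
  intro string mapping _
  simp only [Spec_replace_characters, replace_characters, replace_characters_alt]
  set d := PySem.Dict.ofList mapping with hd
  have hA : string.toList.foldl (fun (acc : List Char) char =>
      if ¬ PySem.Chars.isalpha char then acc ++ (d.getD (String.ofList [char]) "&").toList
      else acc ++ [char]) [] = string.toList.flatMap (pvRep d) := by
    have hrepA : (fun (acc : List Char) char =>
        if ¬ PySem.Chars.isalpha char then acc ++ (d.getD (String.ofList [char]) "&").toList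
        else acc ++ [char]) = fun acc char => acc ++ pvRep d char := by
      funext acc char
      by_cases h : PySem.Chars.isalpha char <;> simp [pvRep, h]
    rw [hrepA]
    simpa using PySem.List.foldl_append_eq_flatMap (pvRep d) string.toList ([] : List Char)
  have hB : string.toList.foldl (fun (out : List Char) char =>
      (if PySem.Chars.isalpha char then String.ofList [char]
       else d.getD (String.ofList [char]) "&").toList.foldl (fun out ch =>
        if out ≠ [] ∧ out.getLast? = some ch ∧ (pvAltVals mapping).contains (String.ofList [ch]) then out
        else out ++ [ch]) out) [] =
      (string.toList.flatMap (pvRep d)).foldl (fun out ch =>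
        if out ≠ [] ∧ out.getLast? = some ch ∧ pvVal d.values ch then out
        else out ++ [ch]) [] := by
    rw [pvFoldl_flatMap]
    congr 1
    funext out char
    have hrB : (if PySem.Chars.isalpha char then String.ofList [char]
        else d.getD (String.ofList [char]) "&").toList = pvRep d char := by
      by_cases h : PySem.Chars.isalpha char <;> simp [pvRep, h]
    rw [hrB]
    congr 1
    funext o c
    rw [pvVal_set, ← hd]
  rw [hA, hB, pvFoldl_step_eq_ded]
  congr 1
  rw [pvLoopA_eq_ded d.values (2 * (string.toList.flatMap (pvRep d)).length)
      (string.toList.flatMap (pvRep d)) 0 (by omega) (by intro j hj; omega)]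
  simp
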